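-- pv_equiv track=rewrite | github.com/EFord36/normalise | splitter.py | mixedcase_split
-- ===== SOURCE A (Python) =====
-- def mixedcase_split(nsw):
--     """ Split tokens on transitions from upper- to lower- or lower- to
--     upper-case.
--     """
--     if nsw.isalpha():
--         if nsw.istitle():
--             return [nsw]
--         else:
--             out = []
--             ind = 0
--             if nsw[0].isupper():
--                 cat = 'up'
--             else:
--                 cat = 'low'
--             for i in range(1, len(nsw)):
--                 if nsw[i].isupper():
--                     if cat == 'up':
--                         pass
--                     else:
--                         out.append(nsw[ind:i])
--                         cat = 'up'
--                         ind = i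
--                 else:
--                     if cat == 'low':
--                         pass
--                     else:
--                         out.append(nsw[ind:i])
--                         cat = 'low'
--                         ind = i
--             out.append(nsw[ind:])
--             return out
--     else:
--         return [nsw]
-- ===== SOURCE B (Python) =====
-- def mixedcase_split(nsw):
--     """ Split tokens on transitions from upper- to lower- or lower- to
--     upper-case.
--     """
--     if not nsw.isalpha() or nsw.istitle():
--         return [nsw]
--     runs = []
--     prev = None
--     for ch in nsw:
--         k = ch.isupper()
--         if k == prev:
--             runs[-1].append(ch)
--         else:
--             runs.append([ch])
--             prev = k
--     return [''.join(r) for r in runs]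
-- ===== Notes on version B (the rewrite author's own statement) =====
-- stated objective: simpler
-- what changed: B drops A's index/slice bookkeeping (ind, cat, range loop, nsw[ind:i] slices) and instead accumulates the case runs directly, appending each character to the current run or starting a new one, then joins the runs.
import Mathlib
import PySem

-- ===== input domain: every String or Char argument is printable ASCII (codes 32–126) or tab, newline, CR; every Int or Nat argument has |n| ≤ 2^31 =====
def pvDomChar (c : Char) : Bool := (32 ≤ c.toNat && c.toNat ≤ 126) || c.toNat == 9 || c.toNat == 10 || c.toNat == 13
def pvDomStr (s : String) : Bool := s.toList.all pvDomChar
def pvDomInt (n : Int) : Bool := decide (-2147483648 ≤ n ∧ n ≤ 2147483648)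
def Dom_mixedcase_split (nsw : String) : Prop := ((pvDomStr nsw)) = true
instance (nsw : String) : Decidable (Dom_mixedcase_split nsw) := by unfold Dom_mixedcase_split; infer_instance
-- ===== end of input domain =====

-- B replaces A's index/slice bookkeeping (ind/cat state, range loop, nsw[ind:i] slices) by directly
-- accumulating the same-case runs character by character; objective: simpler (same O(n) cost).

-- ===== PORT A =====

-- Python str.istitle(), exact on the ASCII domain (only a-z / A-Z are cased there);
-- state: (prev char was cased, some cased char seen).
def pyIstitleAux : List Char → Bool → Bool → Bool
  | [], _, seen => seen
  | c :: cs, prevCased, seen =>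
    if PySem.Chars.isupper c then
      if prevCased then false else pyIstitleAux cs true true
    else if PySem.Chars.islower c then
      if prevCased then pyIstitleAux cs true seen else false
    else pyIstitleAux cs false seen

def pyIstitle (cs : List Char) : Bool := pyIstitleAux cs false false

def mixedcase_split (nsw : String) : List String :=
  let cs := nsw.toList
  if PySem.Chars.strIsalpha cs then
    if pyIstitle cs then [nsw]
    else
      -- nsw[0]: in range here, since isalpha implies cs ≠ [] (the ' ' default is unreachable)
      let cat0 := PySem.Chars.isupper ((PySem.List.pyGet? cs 0).getD ' ')
      let st := (PySem.List.pyRange 1 cs.length).foldl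
        (fun (st : List String × Int × Bool) i =>
          if PySem.Chars.isupper ((PySem.List.pyGet? cs i).getD ' ') then
            if st.2.2 then st
            else (st.1 ++ [String.mk (PySem.List.slice cs (some st.2.1) (some i))], i, true)
          else
            if st.2.2 = false then st
            else (st.1 ++ [String.mk (PySem.List.slice cs (some st.2.1) (some i))], i, false))
        ([], (0 : Int), cat0)
      st.1 ++ [String.mk (PySem.List.slice cs (some st.2.1) none)]
  else [nsw]

-- ===== PORT B =====

-- runs[-1].append(ch): append ch to the last run ([] is unreachable in B, prev = None forces a first run)
def appendLast : List (List Char) → Char → List (List Char)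
  | [], _ => []
  | [r], c => [r ++ [c]]
  | r :: rs, c => r :: appendLast rs c

def mixedcase_split_alt (nsw : String) : List String :=
  let cs := nsw.toList
  if !(PySem.Chars.strIsalpha cs) || pyIstitle cs then [nsw]
  else
    let st := cs.foldl
      (fun (st : List (List Char) × Option Bool) ch =>
        let k := PySem.Chars.isupper ch
        if some k == st.2 then (appendLast st.1 ch, st.2)
        else (st.1 ++ [[ch]], some k))
      ([], none)
    st.1.map String.mk

-- ===== PRECONDITION & SPEC =====
def Spec_mixedcase_split (nsw : String) (out : List String) : Prop := out = mixedcase_split_alt nsw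
instance (nsw : String) (out : List String) : Decidable (Spec_mixedcase_split nsw out) := by unfold Spec_mixedcase_split; infer_instance

-- ===== CLAIM (what is proved, stated in full; the proofs are below) =====
def Claim_equal_mixedcase_split : Prop := ∀ (nsw : String), Dom_mixedcase_split nsw → Spec_mixedcase_split nsw (mixedcase_split nsw)

-- ===== LEMMAS AND PROOFS =====

-- common specification of the run decomposition both loops compute
def runsSpec (k : Bool) (cur : List Char) : List Char → List (List Char)
  | [] => [cur]
  | c :: t =>
    if PySem.Chars.isupper c == k then runsSpec k (cur ++ [c]) t
    else cur :: runsSpec (PySem.Chars.isupper c) [c] t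

theorem appendLast_concat (rs : List (List Char)) (cur : List Char) (c : Char) :
    appendLast (rs ++ [cur]) c = rs ++ [cur ++ [c]] := by
  induction rs with
  | nil => rfl
  | cons r rs ih =>
    cases rs with
    | nil => simp [appendLast]
    | cons r' rs' => simpa [appendLast] using ih

theorem foldB (l : List Char) : ∀ (rs : List (List Char)) (cur : List Char) (k : Bool),
    (l.foldl
      (fun (st : List (List Char) × Option Bool) ch =>
        let k := PySem.Chars.isupper ch
        if some k == st.2 then (appendLast st.1 ch, st.2)
        else (st.1 ++ [[ch]], some k))
      (rs ++ [cur], some k)).1 = rs ++ runsSpec k cur l := by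
  induction l with
  | nil => intro rs cur k; simp [runsSpec]
  | cons c t ih =>
    intro rs cur k
    by_cases h : PySem.Chars.isupper c = k
    · simp only [List.foldl, h, runsSpec, beq_self_eq_true, if_true, appendLast_concat]
      exact ih rs (cur ++ [c]) k
    · simp only [List.foldl, runsSpec]
      rw [if_neg (by simp [h])]
      have := ih (rs ++ [cur]) [c] (PySem.Chars.isupper c)
      rw [if_neg (by simp [h])]
      simpa [List.append_assoc] using this

theorem foldA (cs : List Char) : ∀ (fuel j ind : ℕ) (out : List String) (cat : Bool),
    cs.length - j = fuel → ind ≤ j → j ≤ cs.length →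
    (let st := (PySem.List.pyRange (j : Int) cs.length).foldl
        (fun (st : List String × Int × Bool) i =>
          if PySem.Chars.isupper ((PySem.List.pyGet? cs i).getD ' ') then
            if st.2.2 then st
            else (st.1 ++ [String.mk (PySem.List.slice cs (some st.2.1) (some i))], i, true)
          else
            if st.2.2 = false then st
            else (st.1 ++ [String.mk (PySem.List.slice cs (some st.2.1) (some i))], i, false))
        (out, (ind : Int), cat)
     st.1 ++ [String.mk (PySem.List.slice cs (some st.2.1) none)])
    = out ++ (runsSpec cat ((cs.drop ind).take (j - ind)) (cs.drop j)).map String.mk := by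
  intro fuel
  induction fuel with
  | zero =>
    intro j ind out cat hf hij hj
    have hjn : j = cs.length := by omega
    subst hjn
    have hnil : PySem.List.pyRange (cs.length : Int) cs.length = [] := by
      simp [PySem.List.pyRange]
    simp only [hnil, List.foldl_nil]
    have hdrop : PySem.List.slice cs (some ((ind : ℕ) : Int)) none = cs.drop ind := by
      rw [PySem.List.slice_from cs (by positivity)]; simp
    have htk : (cs.drop ind).take (cs.length - ind) = cs.drop ind := by
      apply List.take_of_length_le; simp
    simp [hdrop, htk, runsSpec]
  | succ m ih =>
    intro j ind out cat hf hij hj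
    have hjlt : j < cs.length := by omega
    have hcons : PySem.List.pyRange (j : Int) cs.length = (j : Int) :: PySem.List.pyRange ((j : Int) + 1) cs.length := by
      exact PySem.List.pyRange_one_cons (by exact_mod_cast hjlt)
    have hget : (PySem.List.pyGet? cs (j : Int)).getD ' ' = cs[j] := by
      rw [PySem.List.pyGet?_natCast]; simp [List.getElem?_eq_getElem hjlt]
    have hdropj : cs.drop j = cs[j] :: cs.drop (j + 1) := (List.getElem_cons_drop hjlt).symm
    have hcast : ((j : Int) + 1) = ((j + 1 : ℕ) : Int) := by push_cast; ring
    by_cases h : PySem.Chars.isupper cs[j] = cat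
    · -- same case: pass
      have htake : (cs.drop ind).take (j + 1 - ind) = (cs.drop ind).take (j - ind) ++ [cs[j]] := by
        have : j + 1 - ind = (j - ind) + 1 := by omega
        rw [this, List.take_add_one]
        have : (cs.drop ind)[j - ind]? = some cs[j] := by
          rw [List.getElem?_drop]
          have : ind + (j - ind) = j := by omega
          rw [this, List.getElem?_eq_getElem hjlt]
        simp [this]
      have hstep := ih (j + 1) ind out cat (by omega) (by omega) (by omega)
      rw [hcons]
      simp only [List.foldl_cons, hget, h]
      rw [show (runsSpec cat ((cs.drop ind).take (j - ind)) (cs.drop j))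
            = runsSpec cat ((cs.drop ind).take (j + 1 - ind)) (cs.drop (j + 1)) by
        rw [hdropj]; simp [runsSpec, h, htake]]
      cases cat <;> simp only [if_true, if_false, Bool.false_eq_true] <;>
        rw [← hstep] <;> rw [hcast]
    · -- case change: append the finished run
      have hslice : PySem.List.slice cs (some ((ind : ℕ) : Int)) (some ((j : ℕ) : Int))
          = (cs.drop ind).take (j - ind) := by
        rw [PySem.List.slice_natCast]
      have htake1 : (cs.drop j).take (j + 1 - j) = [cs[j]] := by
        rw [show j + 1 - j = 1 by omega, hdropj]
        simp only [List.take_succ_cons, List.take_zero]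
      have hstep := ih (j + 1) j (out ++ [String.mk ((cs.drop ind).take (j - ind))])
        (PySem.Chars.isupper cs[j]) (by omega) (by omega) (by omega)
      rw [htake1] at hstep
      rw [hcons]
      simp only [List.foldl_cons, hget]
      rw [show (runsSpec cat ((cs.drop ind).take (j - ind)) (cs.drop j))
            = (cs.drop ind).take (j - ind) :: runsSpec (PySem.Chars.isupper cs[j]) [cs[j]] (cs.drop (j + 1)) by
        rw [hdropj]; simp [runsSpec, h]]
      cases hu : PySem.Chars.isupper cs[j] <;> rw [hu] at h hstep <;>
        cases cat <;> simp only [if_true, if_false, Bool.false_eq_true, Bool.true_eq_false] <;>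
        first
        | (exact absurd rfl h)
        | (rw [hslice, hcast] at *; exact hstep.trans (by simp))

theorem strIsalpha_ne_nil {cs : List Char} (h : PySem.Chars.strIsalpha cs = true) : cs ≠ [] := by
  intro hnil; subst hnil; simp [PySem.Chars.strIsalpha] at h

-- ===== VERDICT (by name: the statement is the Claim_ definition above) =====
theorem mixedcase_split_spec : Claim_equal_mixedcase_split := by
  intro nsw _
  unfold Spec_mixedcase_split mixedcase_split mixedcase_split_alt
  set cs := nsw.toList with hcs
  by_cases ha : PySem.Chars.strIsalpha cs = true
  · by_cases ht : pyIstitle cs = true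
    · simp [ha, ht]
    · obtain ⟨c0, rest, hsplit⟩ : ∃ c0 rest, cs = c0 :: rest := by
        cases hcs2 : cs with
        | nil => exact absurd hcs2 (strIsalpha_ne_nil ha)
        | cons a b => exact ⟨a, b, rfl⟩
      simp only [ha, ht, if_true, Bool.not_true, Bool.false_or]
      -- A side
      have hget0 : (PySem.List.pyGet? cs 0).getD ' ' = c0 := by
        rw [show (0 : Int) = ((0 : ℕ) : Int) by norm_num, PySem.List.pyGet?_natCast, hsplit]; rfl
      have hA := foldA cs (cs.length - 1) 1 0 [] (PySem.Chars.isupper c0) rfl (by omega)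
        (by rw [hsplit]; simp)
      simp only [Nat.cast_one, Nat.cast_zero, List.drop_zero, List.drop_one] at hA
      have htk1 : cs.take (1 - 0) = [c0] := by rw [hsplit]; rfl
      rw [htk1] at hA
      -- B side
      have hB0 : cs.foldl
          (fun (st : List (List Char) × Option Bool) ch =>
            let k := PySem.Chars.isupper ch
            if some k == st.2 then (appendLast st.1 ch, st.2)
            else (st.1 ++ [[ch]], some k))
          ([], none)
        = rest.foldl
          (fun (st : List (List Char) × Option Bool) ch =>
            let k := PySem.Chars.isupper ch
            if some k == st.2 then (appendLast st.1 ch, st.2)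
            else (st.1 ++ [[ch]], some k))
          ([] ++ [[c0]], some (PySem.Chars.isupper c0)) := by
        rw [hsplit]; rfl
      have hB := foldB rest [] [c0] (PySem.Chars.isupper c0)
      rw [hget0]
      rw [hA]
      rw [hB0, hB]
      rw [hsplit]
      simp [List.tail]
  · simp [ha]
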